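-- pv_equiv track=rewrite | github.com/RyannDaGreat/rp | rp_ptpython/selection_utils.py | get_comment_block_spans
-- ===== SOURCE A (Python) =====
-- from typing import List, Tuple, Optional, Set
--
-- Span = Tuple[int, int]
--
-- def get_comment_block_spans(code: str) -> Set[Span]:
--     """Spans for contiguous comment blocks."""
--     spans, offset, start, end = set(), 0, None, None
--     for line in code.split('\n'):
--         if line.strip().startswith('#'):
--             if start is None:
--                 start = offset
--             end = offset + len(line)
--         elif start is not None:
--             spans.add((start, end))
--             indent = len(line) - len(line.lstrip()) if line.strip() else 0
--             if indent and start + indent < end: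
--                 spans.add((start + indent, end))
--             start = None
--         offset += len(line) + 1
--     if start is not None:
--         spans.add((start, end))
--     return spans
-- ===== SOURCE B (Python) =====
-- def get_comment_block_spans(code):
--     """Spans for contiguous comment blocks: consume each maximal comment run at once."""
--     spans = set()
--     lines = code.split('\n')
--     offset = 0
--     while lines:
--         if not lines[0].strip().startswith('#'):
--             offset += len(lines[0]) + 1
--             lines = lines[1:]
--             continue
--         run = []
--         while lines and lines[0].strip().startswith('#'):
--             run.append(lines.pop(0))
--         start = offset
--         offset += sum(len(l) + 1 for l in run)
--         end = offset - 1
--         spans.add((start, end))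
--         if lines:
--             nxt = lines[0]
--             indent = len(nxt) - len(nxt.lstrip()) if nxt.strip() else 0
--             if indent and start + indent < end:
--                 spans.add((start + indent, end))
--     return spans
-- ===== Notes on version B (the rewrite author's own statement) =====
-- stated objective: alternative
-- what changed: A scans line by line with Optional start/end registers and a final flush; B recursively consumes each maximal run of comment lines in one step (takeWhile/dropWhile), computing the span end from the run's total length and peeking at the following line for the indent span.
import Mathlib
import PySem

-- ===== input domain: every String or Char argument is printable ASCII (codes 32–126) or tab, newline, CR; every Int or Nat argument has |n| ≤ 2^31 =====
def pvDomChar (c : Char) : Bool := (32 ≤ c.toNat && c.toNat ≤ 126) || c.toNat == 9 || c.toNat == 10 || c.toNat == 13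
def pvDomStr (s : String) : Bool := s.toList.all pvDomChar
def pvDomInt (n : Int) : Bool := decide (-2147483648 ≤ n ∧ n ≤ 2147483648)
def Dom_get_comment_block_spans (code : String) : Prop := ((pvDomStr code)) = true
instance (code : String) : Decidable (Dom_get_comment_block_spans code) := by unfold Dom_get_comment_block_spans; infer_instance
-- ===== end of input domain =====

-- B rewrites A's line-at-a-time state machine (Optional start/end registers) as a
-- run-at-a-time recursion that consumes each maximal comment run in one step (objective: alternative).

-- ===== PORT A =====
-- A's loop state (spans, offset, start, end).  Python initialises `end = None` but only
-- ever reads it after assigning it (whenever `start` is not None); it is ported as an Int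
-- with dummy initial value 0, read exactly where Python reads it.
def pvAStep (st : List (Int × Int) × Int × Option Int × Int) (line : String) :
    List (Int × Int) × Int × Option Int × Int :=
  match st with
  | (spans, offset, start, e) =>
    if PySem.Str.startswith (PySem.Str.strip line) "#" then
      (spans, offset + PySem.Str.len line + 1,
        (if start = none then some offset else start), offset + PySem.Str.len line)
    else
      match start with
      | none => (spans, offset + PySem.Str.len line + 1, none, e)
      | some s =>
        let spans := PySem.Set.add spans (s, e)
        let indent : Int :=
          if PySem.Str.strip line ≠ "" then PySem.Str.len line - PySem.Str.len (PySem.Str.lstrip line) else 0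
        let spans := if indent ≠ 0 ∧ s + indent < e then PySem.Set.add spans (s + indent, e) else spans
        (spans, offset + PySem.Str.len line + 1, none, e)

def get_comment_block_spans (code : String) : List (Int × Int) :=
  -- code.split('\n'); the separator "\n" is nonempty, so split? is always `some`
  match ((PySem.Str.split? code "\n").getD []).foldl pvAStep ([], 0, none, 0) with
  | (spans, _, none, _) => spans
  | (spans, _, some s, e) => PySem.Set.add spans (s, e)

-- ===== PORT B =====
def pvIsCmt (line : String) : Bool := PySem.Str.startswith (PySem.Str.strip line) "#"

def pvBGo (spans : List (Int × Int)) (lines : List String) (offset : Int) : List (Int × Int) :=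
  match lines with
  | [] => spans
  | line :: rest =>
    if h : pvIsCmt line = false then
      pvBGo spans rest (offset + PySem.Str.len line + 1)
    else
      let run := (line :: rest).takeWhile pvIsCmt
      let rest' := (line :: rest).dropWhile pvIsCmt
      let start := offset
      let offset' := offset + (run.map (fun l => PySem.Str.len l + 1)).sum
      let e := offset' - 1
      let spans := PySem.Set.add spans (start, e)
      let spans :=
        match rest' with
        | [] => spans
        | nxt :: _ =>
          let indent : Int :=
            if PySem.Str.strip nxt ≠ "" then PySem.Str.len nxt - PySem.Str.len (PySem.Str.lstrip nxt) else 0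
          if indent ≠ 0 ∧ start + indent < e then PySem.Set.add spans (start + indent, e) else spans
      pvBGo spans rest' offset'
termination_by lines.length
decreasing_by
  · simp
  · simp only [List.dropWhile_cons_of_pos (by simpa using h)]
    exact Nat.lt_succ_of_le (List.length_dropWhile_le _ _)

def get_comment_block_spans_alt (code : String) : List (Int × Int) :=
  pvBGo [] ((PySem.Str.split? code "\n").getD []) 0

-- ===== PRECONDITION & SPEC =====
def Spec_get_comment_block_spans (code : String) (out : List (Int × Int)) : Prop := out = get_comment_block_spans_alt code
instance (code : String) (out : List (Int × Int)) : Decidable (Spec_get_comment_block_spans code out) := by unfold Spec_get_comment_block_spans; infer_instance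

-- ===== CLAIM (what is proved, stated in full; the proofs are below) =====
def Claim_equal_get_comment_block_spans : Prop := ∀ (code : String), Dom_get_comment_block_spans code → Spec_get_comment_block_spans code (get_comment_block_spans code)

-- ===== LEMMAS AND PROOFS =====

-- A's final flush, as a function of the loop state.
def pvAOut (st : List (Int × Int) × Int × Option Int × Int) : List (Int × Int) :=
  match st with
  | (spans, _, none, _) => spans
  | (spans, _, some s, e) => PySem.Set.add spans (s, e)

-- Inside a comment run A only advances offset/end: from a state with start set and
-- end = offset - 1, a run of comment lines leads to end = offset' - 1 again.
lemma pvA_run (run : List String) (hrun : ∀ l ∈ run, pvIsCmt l = true) :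
    ∀ (spans : List (Int × Int)) (off s : Int),
      run.foldl pvAStep (spans, off, some s, off - 1)
        = (spans, off + (run.map (fun l => PySem.Str.len l + 1)).sum, some s, off + (run.map (fun l => PySem.Str.len l + 1)).sum - 1) := by
  induction run with
  | nil => intro spans off s; simp
  | cons l run ih =>
    intro spans off s
    have hl : pvIsCmt l = true := hrun l (by simp)
    simp only [List.foldl_cons, pvAStep]
    rw [if_pos (by simpa [pvIsCmt] using hl)]
    have this1 := ih (fun x hx => hrun x (by simp [hx])) spans (off + PySem.Str.len l + 1) s
    rw [show off + PySem.Str.len l + 1 - 1 = off + PySem.Str.len l by ring] at this1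
    simp only [reduceCtorEq, if_false, this1]
    simp [Prod.ext_iff]; ring

-- Main invariant: A's fold (start cleared) followed by the flush equals B's run recursion.
lemma pvAB : ∀ (n : Nat) (lines : List String), lines.length ≤ n →
    ∀ (spans : List (Int × Int)) (off e0 : Int),
      pvAOut (lines.foldl pvAStep (spans, off, none, e0)) = pvBGo spans lines off := by
  intro n
  induction n with
  | zero =>
    intro lines hlen spans off e0
    have h0 : lines = [] := List.eq_nil_of_length_eq_zero (Nat.le_zero.mp hlen)
    subst h0; simp [pvAOut, pvBGo]
  | succ n ih =>
    intro lines hlen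
    cases lines with
    | nil => intro spans off e0; simp [pvAOut, pvBGo]
    | cons line rest =>
      intro spans off e0
      have hrlen : rest.length ≤ n := by simpa using hlen
      by_cases hc : pvIsCmt line = true
      · -- comment head: split rest into its comment prefix and the remainder
        have hsplit : rest = rest.takeWhile pvIsCmt ++ rest.dropWhile pvIsCmt :=
          (List.takeWhile_append_dropWhile).symm
        have htw : ∀ l ∈ rest.takeWhile pvIsCmt, pvIsCmt l = true :=
          fun l hl => List.mem_takeWhile_imp hl
        simp only [List.foldl_cons, pvAStep]
        rw [if_pos (by simpa [pvIsCmt] using hc)]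
        simp only [reduceIte]
        conv_lhs => rw [hsplit, List.foldl_append]
        have hst : ((spans, off + PySem.Str.len line + 1, some off, off + PySem.Str.len line) : List (Int × Int) × Int × Option Int × Int)
            = (spans, off + PySem.Str.len line + 1, some off, (off + PySem.Str.len line + 1) - 1) := by
          simp
        rw [hst, pvA_run _ htw]
        set S := ((rest.takeWhile pvIsCmt).map (fun l => PySem.Str.len l + 1)).sum with hS
        rw [pvBGo]
        rw [dif_neg (by simp [hc])]
        simp only [List.takeWhile_cons_of_pos hc, List.dropWhile_cons_of_pos hc]
        have hoff' : off + (((line :: rest.takeWhile pvIsCmt)).map (fun l => PySem.Str.len l + 1)).sum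
            = off + PySem.Str.len line + 1 + S := by simp [hS]; ring
        cases hdrop : rest.dropWhile pvIsCmt with
        | nil =>
          simp only [List.foldl_nil, pvAOut, hoff']
          rw [pvBGo]
        | cons nxt rest'' =>
          have hnx : pvIsCmt nxt = false := by
            have hne : rest.dropWhile pvIsCmt ≠ [] := by simp [hdrop]
            simpa [hdrop] using List.head_dropWhile_not pvIsCmt hne
          simp only [List.foldl_cons, pvAStep]
          rw [if_neg (by simp only [pvIsCmt] at hnx; simpa using hnx)]
          rw [ih rest'' (by
            have h1 := List.length_dropWhile_le pvIsCmt rest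
            rw [hdrop] at h1; simp at h1; omega)]
          rw [hoff']
          conv_rhs => rw [pvBGo]
          rw [dif_pos hnx]
      · -- non-comment head with start = None: both sides skip the line
        simp only [List.foldl_cons, pvAStep]
        rw [if_neg (by simpa [pvIsCmt] using hc)]
        rw [pvBGo, dif_pos (by simpa using hc)]
        exact ih rest hrlen spans (off + PySem.Str.len line + 1) e0

-- ===== VERDICT (by name: the statement is the Claim_ definition above) =====
theorem get_comment_block_spans_spec : Claim_equal_get_comment_block_spans := by
  intro code _
  unfold Spec_get_comment_block_spans get_comment_block_spans get_comment_block_spans_alt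
  rw [← pvAB _ _ (le_refl _)]
  rfl
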